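-- pv_equiv track=rewrite | github.com/poojithumeshrao/projectEuler | projectEuler/p61.py | check_comp
-- ===== SOURCE A (Python) =====
-- def check_comp(vals):
--     flag = True
--     cnt = 0
--     for i in range(len(vals)):
--         v = vals[i]
--         f2 = False
--         for j in range(len(vals)):
--             v2 = vals[j]
--             if v%100 == v2//100 and i!=j:
--                 f2 = True
--
--         if f2 == False:
--             cnt += 1
--             flag = False
--
--     return flag,cnt
-- ===== SOURCE B (Python) =====
-- def check_comp(vals):
--     prefs = [v // 100 for v in vals]
--     counts = {}
--     for p in prefs:
--         counts[p] = counts.get(p, 0) + 1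
--     cnt = 0
--     for v in vals:
--         m = counts.get(v % 100, 0)
--         if v // 100 == v % 100:
--             m -= 1
--         if m == 0:
--             cnt += 1
--     return cnt == 0, cnt
-- ===== Notes on version B (the rewrite author's own statement) =====
-- stated objective: faster
-- what changed: Replaced the quadratic all-pairs inner scan by a one-pass dict counting v//100 prefixes, then a single pass looking up v%100 with a self-match adjustment.
import Mathlib
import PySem

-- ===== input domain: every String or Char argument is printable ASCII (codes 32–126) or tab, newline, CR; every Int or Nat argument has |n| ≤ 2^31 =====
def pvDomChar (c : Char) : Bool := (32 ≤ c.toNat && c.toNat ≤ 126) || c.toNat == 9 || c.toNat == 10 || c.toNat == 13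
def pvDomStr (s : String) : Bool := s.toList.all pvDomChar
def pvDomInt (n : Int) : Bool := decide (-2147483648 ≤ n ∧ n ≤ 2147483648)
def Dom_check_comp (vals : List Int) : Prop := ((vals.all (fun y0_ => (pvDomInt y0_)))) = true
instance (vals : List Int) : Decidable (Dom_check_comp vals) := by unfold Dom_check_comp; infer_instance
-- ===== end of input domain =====

-- B replaces A's quadratic all-pairs inner scan by a dict counting v//100 prefixes built in one
-- pass, then a single lookup pass with a self-match adjustment (objective: faster).


-- ===== PORT A =====
def check_comp (vals : List Int) : Bool × Int :=
  (PySem.List.pyRange 0 (PySem.List.len vals) 1).foldl (fun (s : Bool × Int) i =>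
    let v := PySem.List.pyGetD vals i 0
    let f2 := (PySem.List.pyRange 0 (PySem.List.len vals) 1).foldl (fun f2 j =>
      let v2 := PySem.List.pyGetD vals j 0
      if PySem.Int.mod v 100 = PySem.Int.floordiv v2 100 ∧ i ≠ j then true else f2) false
    if f2 = false then (false, s.2 + 1) else s) (true, 0)

-- ===== PORT B =====
def check_comp_alt (vals : List Int) : Bool × Int :=
  let prefs := vals.map (fun v => PySem.Int.floordiv v 100)
  let counts := prefs.foldl (fun d p => d.insert p (d.getD p 0 + 1)) (PySem.Dict.empty : PySem.Dict Int Int)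
  let cnt := vals.foldl (fun cnt v =>
    let m := counts.getD (PySem.Int.mod v 100) 0
    let m := if PySem.Int.floordiv v 100 = PySem.Int.mod v 100 then m - 1 else m
    if m = 0 then cnt + 1 else cnt) (0 : Int)
  (cnt == 0, cnt)

-- ===== PRECONDITION & SPEC =====
def Spec_check_comp (vals : List Int) (out : Bool × Int) : Prop := out = check_comp_alt vals
instance (vals : List Int) (out : Bool × Int) : Decidable (Spec_check_comp vals out) := by unfold Spec_check_comp; infer_instance

-- ===== CLAIM (what is proved, stated in full; the proofs are below) =====
def Claim_equal_check_comp : Prop := ∀ (vals : List Int), Dom_check_comp vals → Spec_check_comp vals (check_comp vals)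

-- ===== LEMMAS AND PROOFS =====

-- A's counts dictionary and B's adjusted count, as proof-side abbreviations
def pvCounts (vals : List Int) : PySem.Dict Int Int :=
  (vals.map (fun v => PySem.Int.floordiv v 100)).foldl (fun d p => d.insert p (d.getD p 0 + 1)) (PySem.Dict.empty : PySem.Dict Int Int)

def pvM (vals : List Int) (v : Int) : Int :=
  let m := (pvCounts vals).getD (PySem.Int.mod v 100) 0
  if PySem.Int.floordiv v 100 = PySem.Int.mod v 100 then m - 1 else m

-- A's inner loop as a function of the outer index/value
def pvF2 (vals : List Int) (i v : Int) : Bool :=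
  (PySem.List.pyRange 0 (PySem.List.len vals) 1).foldl (fun f2 j =>
    let v2 := PySem.List.pyGetD vals j 0
    if PySem.Int.mod v 100 = PySem.Int.floordiv v2 100 ∧ i ≠ j then true else f2) false

-- a "set f2 = True on hit" loop is an `any`
theorem pv_foldl_if_true {α : Type} (p : α → Prop) [DecidablePred p] (l : List α) (b : Bool) :
    l.foldl (fun acc x => if p x then true else acc) b = (b || l.any (fun x => decide (p x))) := by
  induction l generalizing b with
  | nil => simp
  | cons x l ih =>
      by_cases h : p x
      · rw [List.foldl_cons, if_pos h, ih]; simp [h]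
      · rw [List.foldl_cons, if_neg h, ih]; simp [h]

-- A's outer loop in closed form: flag clears iff any hit, cnt adds the number of hits
theorem pv_foldl_flag_cnt {α : Type} (p : α → Prop) [DecidablePred p] (l : List α) (b : Bool) (c : Int) :
    l.foldl (fun (s : Bool × Int) x => if p x then (false, s.2 + 1) else s) (b, c)
      = (b && !(l.any fun x => decide (p x)), c + (l.countP fun x => decide (p x) : Nat)) := by
  induction l generalizing b c with
  | nil => simp
  | cons x l ih =>
      by_cases h : p x
      · rw [List.foldl_cons, if_pos h, ih]
        simp [h]; omega
      · rw [List.foldl_cons, if_neg h, ih]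
        simp [h]

-- B's counting loop in closed form
theorem pv_foldl_cnt {α : Type} (p : α → Prop) [DecidablePred p] (l : List α) (c : Int) :
    l.foldl (fun (c : Int) x => if p x then c + 1 else c) c = c + (l.countP fun x => decide (p x) : Nat) := by
  induction l generalizing c with
  | nil => simp
  | cons x l ih =>
      by_cases h : p x
      · rw [List.foldl_cons, if_pos h, ih]
        simp [h]; omega
      · rw [List.foldl_cons, if_neg h, ih]
        simp [h]

-- `any` over an enumeration with an always-true index-disequality is `any` over the list
theorem pv_any_enumerate_ne {α : Type} (q : α → Bool) (n : Int) :
    ∀ (l : List α) (s : Int), (n < s ∨ s + l.length ≤ n) →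
    (PySem.List.enumerate l s).any (fun jv => q jv.2 && decide (n ≠ jv.1)) = l.any q := by
  intro l
  induction l with
  | nil => intro s _; simp [PySem.List.enumerate_nil]
  | cons x l ih =>
      intro s hs
      have hne : n ≠ s := by simp at hs ⊢; omega
      rw [PySem.List.enumerate_cons]
      simp only [List.any_cons]
      rw [ih (s + 1) (by simp at hs ⊢; omega)]
      simp [hne]

-- the counts dict looks up the number of values whose prefix is t
theorem pv_counts_getD (vals : List Int) (t : Int) :
    (pvCounts vals).getD t 0 = (vals.countP fun x => PySem.Int.floordiv x 100 == t : Nat) := by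
  unfold pvCounts
  rw [PySem.Dict.getD_foldl_insert_add_one]
  simp [List.count_eq_countP, List.countP_map]
  rfl

-- A's inner loop is an `any` over the enumeration
theorem pv_f2_any (vals : List Int) (i v : Int) :
    pvF2 vals i v = (PySem.List.enumerate vals 0).any
      (fun jv => decide (PySem.Int.mod v 100 = PySem.Int.floordiv jv.2 100) && decide (i ≠ jv.1)) := by
  unfold pvF2
  rw [pv_foldl_if_true (p := fun j => PySem.Int.mod v 100 = PySem.Int.floordiv (PySem.List.pyGetD vals j 0) 100 ∧ i ≠ j)]
  rw [PySem.List.enumerate_eq_map_pyRange (d := 0), List.any_map]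
  simp [Function.comp_def]

-- splitting the enumeration at the current index
theorem pv_any_split {α : Type} (q : α → Bool) (l₁ l₂ : List α) (v : α) :
    (PySem.List.enumerate (l₁ ++ v :: l₂) 0).any
      (fun jv => q jv.2 && decide ((l₁.length : Int) ≠ jv.1)) = (l₁.any q || l₂.any q) := by
  rw [PySem.List.enumerate_append, List.any_append, PySem.List.enumerate_cons, List.any_cons]
  rw [pv_any_enumerate_ne q _ l₁ 0 (by right; simp)]
  rw [pv_any_enumerate_ne q _ l₂ (0 + (l₁.length : Int) + 1) (by left; omega)]
  simp

-- pointwise: A's "no partner" test agrees with B's adjusted-count test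
theorem pv_pointwise (vals : List Int) (k : Nat) (hk : k < vals.length) :
    (pvF2 vals (0 + (k : Int)) vals[k] = false) ↔ pvM vals vals[k] = 0 := by
  have hdec : vals.take k ++ vals[k] :: vals.drop (k+1) = vals := by
    rw [List.getElem_cons_drop hk, List.take_append_drop]
  set v := vals[k] with hv
  set t := PySem.Int.mod v 100 with ht
  set q : Int → Bool := fun x => decide (t = PySem.Int.floordiv x 100) with hq
  have hlen : (vals.take k).length = k := by simp [List.length_take]; omega
  have hqq : (fun x => PySem.Int.floordiv x 100 == t) = q := by
    funext x
    rw [hq, Bool.beq_eq_decide_eq]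
    simp [eq_comm]
  have hf2 : pvF2 vals (0 + (k : Int)) v = ((vals.take k).any q || (vals.drop (k+1)).any q) := by
    rw [pv_f2_any]
    conv_lhs => rw [← hdec]
    rw [show ((0 : Int) + (k : Int)) = ((vals.take k).length : Int) by rw [hlen]; omega]
    exact pv_any_split q _ _ _
  have hcnt : pvM vals v = ((vals.take k).countP q + (vals.drop (k+1)).countP q : Nat) := by
    unfold pvM
    rw [pv_counts_getD]
    conv_lhs => rw [← hdec]
    rw [List.countP_append, List.countP_cons, hqq]
    by_cases hself : PySem.Int.floordiv v 100 = t
    · have hcond : (PySem.Int.floordiv v 100 == PySem.Int.mod v 100) = true := by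
        rw [Bool.beq_eq_decide_eq]; exact decide_eq_true hself
      rw [if_pos hself]
      simp only [hcond, if_true]
      push_cast; ring
    · have hcond : (PySem.Int.floordiv v 100 == PySem.Int.mod v 100) = false := by
        rw [Bool.beq_eq_decide_eq]; exact decide_eq_false hself
      rw [if_neg hself]
      simp only [hcond, Bool.false_eq_true, if_false]
      push_cast; ring
  rw [hf2, hcnt]
  constructor
  · intro h
    simp only [Bool.or_eq_false_iff, List.any_eq_false] at h
    have h1 : (vals.take k).countP q = 0 := List.countP_eq_zero.2 h.1
    have h2 : (vals.drop (k+1)).countP q = 0 := List.countP_eq_zero.2 h.2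
    simp [h1, h2]
  · intro h
    have h0 : (vals.take k).countP q = 0 ∧ (vals.drop (k+1)).countP q = 0 := by omega
    simp only [Bool.or_eq_false_iff, List.any_eq_false]
    exact ⟨List.countP_eq_zero.1 h0.1, List.countP_eq_zero.1 h0.2⟩

-- pointwise equality of the two per-element tests, over the enumeration
theorem pv_key (vals : List Int) :
    ∀ jv ∈ PySem.List.enumerate vals 0,
      (decide (pvF2 vals jv.1 jv.2 = false)) = (decide (pvM vals jv.2 = 0)) := by
  intro jv hjv
  rw [PySem.List.mem_enumerate_iff] at hjv
  obtain ⟨k, hk, rfl⟩ := hjv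
  exact decide_eq_decide.2 (pv_pointwise vals k hk)

theorem pv_countP_eq (vals : List Int) :
    (PySem.List.enumerate vals 0).countP (fun jv => decide (pvF2 vals jv.1 jv.2 = false))
      = vals.countP (fun v => decide (pvM vals v = 0)) := by
  calc (PySem.List.enumerate vals 0).countP (fun jv => decide (pvF2 vals jv.1 jv.2 = false))
      = (PySem.List.enumerate vals 0).countP (fun jv => decide (pvM vals jv.2 = 0)) :=
        List.countP_congr (fun x hx => by rw [pv_key vals x hx])
    _ = vals.countP (fun v => decide (pvM vals v = 0)) := by
        have hgen : ∀ (p : Int → Bool),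
            (PySem.List.enumerate vals 0).countP (fun jv => p jv.2) = vals.countP p := by
          intro p
          conv_rhs => rw [← PySem.List.map_snd_enumerate (xs := vals) (s := 0)]
          rw [List.countP_map]
          rfl
        exact hgen (fun v => decide (pvM vals v = 0))

-- ===== VERDICT (by name: the statement is the Claim_ definition above) =====
theorem check_comp_spec : Claim_equal_check_comp := by
  intro vals _
  unfold Spec_check_comp
  have hA : check_comp vals
      = (PySem.List.enumerate vals 0).foldl
          (fun (s : Bool × Int) jv => if pvF2 vals jv.1 jv.2 = false then (false, s.2 + 1) else s)
          (true, 0) := by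
    rw [PySem.List.enumerate_eq_map_pyRange (d := 0), List.foldl_map]
    rfl
  have hB : check_comp_alt vals
      = ((vals.foldl (fun (c : Int) v => if pvM vals v = 0 then c + 1 else c) 0 == 0),
          vals.foldl (fun (c : Int) v => if pvM vals v = 0 then c + 1 else c) 0) := rfl
  rw [hA, hB]
  simp only [pv_foldl_flag_cnt, pv_foldl_cnt]
  rw [pv_countP_eq]
  by_cases hz : vals.countP (fun v => decide (pvM vals v = 0)) = 0
  · have hany : (PySem.List.enumerate vals 0).any
        (fun jv => decide (pvF2 vals jv.1 jv.2 = false)) = false := by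
      apply List.any_eq_false.2
      exact List.countP_eq_zero.1 (by rw [pv_countP_eq]; exact hz)
    rw [hz, hany]
    decide
  · have hany : (PySem.List.enumerate vals 0).any
        (fun jv => decide (pvF2 vals jv.1 jv.2 = false)) = true := by
      apply List.any_eq_true.2
      have hpos : 0 < (PySem.List.enumerate vals 0).countP
          (fun jv => decide (pvF2 vals jv.1 jv.2 = false)) := by
        rw [pv_countP_eq]; exact Nat.pos_of_ne_zero hz
      obtain ⟨a, ha, hpa⟩ := List.countP_pos_iff.1 hpos
      exact ⟨a, ha, hpa⟩
    rw [hany]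
    simp only [Bool.true_and, Bool.not_true, Prod.mk.injEq, Bool.beq_eq_decide_eq]
    refine ⟨?_, by trivial⟩
    symm
    rw [decide_eq_false_iff_not]
    omega
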